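-- pv_equiv track=rewrite | github.com/shrekrr/sentiment_analyser | frontend/inference.py | _detect_contrastive_shift
-- ===== SOURCE A (Python) =====
-- def _detect_contrastive_shift(text: str) -> bool:
--     CONTRAST_WORDS = ["but", "however", "although", "yet",
--                       "nevertheless", "despite", "while", "whereas"]
--     text_lower = text.lower()
--
--     for word in CONTRAST_WORDS:
--         if f" {word} " in f" {text_lower} ":
--             return True
--     return False
-- ===== SOURCE B (Python) =====
-- def _detect_contrastive_shift(text: str) -> bool:
--     CONTRAST_WORDS = ["but", "however", "although", "yet",
--                       "nevertheless", "despite", "while", "whereas"]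
--     return bool(set(CONTRAST_WORDS) & set(text.lower().split(" ")))
-- ===== Notes on version B (the rewrite author's own statement) =====
-- stated objective: idiomatic
-- what changed: B tokenizes the lowercased text once with split(" ") into a set and intersects it with the contrast-word set, instead of scanning the space-padded text once per contrast word with substring search.
import Mathlib
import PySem

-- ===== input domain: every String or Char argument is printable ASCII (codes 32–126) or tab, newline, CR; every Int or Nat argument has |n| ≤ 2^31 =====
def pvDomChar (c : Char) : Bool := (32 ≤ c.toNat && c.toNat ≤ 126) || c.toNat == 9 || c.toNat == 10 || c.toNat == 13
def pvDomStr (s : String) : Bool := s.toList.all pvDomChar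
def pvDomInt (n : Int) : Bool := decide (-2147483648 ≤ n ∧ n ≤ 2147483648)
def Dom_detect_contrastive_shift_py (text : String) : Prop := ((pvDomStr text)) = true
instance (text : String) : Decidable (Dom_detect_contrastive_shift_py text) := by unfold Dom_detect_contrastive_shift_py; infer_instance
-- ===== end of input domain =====

-- B builds the set of space-delimited tokens of the lowercased text once and intersects
-- it with the contrast-word set, instead of scanning the space-padded text once per word (idiomatic rewrite).

-- ===== PORT A =====
-- the CONTRAST_WORDS literal, shared verbatim by both ports (as lists of code points)
def pvContrastWords : List (List Char) :=
  ["but".toList, "however".toList, "although".toList, "yet".toList,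
   "nevertheless".toList, "despite".toList, "while".toList, "whereas".toList]

-- A's loop: 'for word in CONTRAST_WORDS: if f" {word} " in f" {text_lower} ": return True' / 'return False'
def pvALoop : List (List Char) → List Char → Bool
  | [], _ => false
  | w :: ws, tl =>
      if PySem.Chars.isIn ([' '] ++ w ++ [' ']) ([' '] ++ tl ++ [' ']) then true
      else pvALoop ws tl

def detect_contrastive_shift_py (text : String) : Bool :=
  pvALoop pvContrastWords (PySem.Chars.lower text.toList)

-- ===== PORT B =====
-- 'return bool(set(CONTRAST_WORDS) & set(text.lower().split(" ")))'
def detect_contrastive_shift_py_alt (text : String) : Bool :=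
  !(PySem.Set.inter (PySem.Set.ofList pvContrastWords)
      (PySem.Set.ofList (PySem.Chars.splitOn (PySem.Chars.lower text.toList) [' ']))).isEmpty

-- ===== PRECONDITION & SPEC =====
def Spec_detect_contrastive_shift_py (text : String) (out : Bool) : Prop := out = detect_contrastive_shift_py_alt text
instance (text : String) (out : Bool) : Decidable (Spec_detect_contrastive_shift_py text out) := by unfold Spec_detect_contrastive_shift_py; infer_instance

-- ===== CLAIM (what is proved, stated in full; the proofs are below) =====
def Claim_equal_detect_contrastive_shift_py : Prop := ∀ (text : String), Dom_detect_contrastive_shift_py text → Spec_detect_contrastive_shift_py text (detect_contrastive_shift_py text)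

-- ===== LEMMAS AND PROOFS =====

-- proof-side model of t.split(" "): head token = takeWhile (≠ ' '), pvRestTok = the later tokens
def pvRestTok : List Char → List (List Char)
  | [] => []
  | c :: t => if c = ' ' then t.takeWhile (· ≠ ' ') :: pvRestTok t else pvRestTok t

def pvToks (t : List Char) : List (List Char) := t.takeWhile (· ≠ ' ') :: pvRestTok t

-- splitOn.go with single-space separator computes pvToks (with the pending token cur and collected acc)
theorem pv_splitOn_go (fuel : Nat) : ∀ (t cur : List Char) (acc : List (List Char)),
    t.length < fuel →
    PySem.Chars.splitOn.go [' '] fuel t cur acc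
      = acc.reverse ++ (cur.reverse ++ t.takeWhile (· ≠ ' ')) :: pvRestTok t := by
  induction fuel with
  | zero => intro t cur acc h; omega
  | succ n ih =>
    intro t cur acc h
    cases t with
    | nil => simp [PySem.Chars.splitOn.go, pvRestTok]
    | cons c rest =>
      by_cases hc : c = ' '
      · subst hc
        rw [PySem.Chars.splitOn.go]
        rw [if_pos (by simp [List.isPrefixOf] : ([' '] : List Char).isPrefixOf (' ' :: rest) = true)]
        simp only [List.length_cons, List.length_nil, List.drop_succ_cons, List.drop_zero]
        rw [ih rest [] (cur.reverse :: acc) (by simp only [List.length_cons] at h; omega)]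
        simp [pvRestTok, List.takeWhile]
      · rw [PySem.Chars.splitOn.go]
        have hpre : ([' '] : List Char).isPrefixOf (c :: rest) = false := by
          simp [List.isPrefixOf, BEq.beq]
          intro hcontra; exact hc hcontra.symm
        rw [if_neg (by simp [hpre])]
        rw [ih rest (c :: cur) acc (by simp only [List.length_cons] at h; omega)]
        simp [pvRestTok, List.takeWhile, hc]

theorem pv_splitOn_eq (t : List Char) :
    PySem.Chars.splitOn t [' '] = pvToks t := by
  unfold PySem.Chars.splitOn
  rw [pv_splitOn_go (t.length + 1) t [] [] (by omega)]
  simp [pvToks]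

-- prefix lemma: for a space-free w, "w " is a prefix of "t " iff w is t's first token
theorem pv_prefix_iff (w : List Char) (hw : ' ' ∉ w) :
    ∀ t : List Char, (w ++ [' ']) <+: (t ++ [' ']) ↔ w = t.takeWhile (· ≠ ' ') := by
  induction w with
  | nil =>
    intro t
    simp only [List.nil_append]
    cases t with
    | nil => simp [List.takeWhile]
    | cons b t' =>
      rw [List.cons_append, List.cons_prefix_cons]
      by_cases hb : b = ' '
      · subst hb; simp [List.takeWhile]
      · simp [List.takeWhile, hb]
        exact fun hh => hb hh.symm
  | cons a w' ihw =>
    intro t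
    have ha : a ≠ ' ' := fun h => hw (h ▸ List.mem_cons_self ..)
    have hw' : ' ' ∉ w' := fun h => hw (List.mem_cons_of_mem _ h)
    cases t with
    | nil =>
      constructor
      · intro hpre
        rcases hpre with ⟨s, hs⟩
        simp at hs
      · intro h; simp [List.takeWhile] at h
    | cons b t' =>
      by_cases hb : b = ' '
      · subst hb
        constructor
        · intro hpre
          rcases hpre with ⟨s, hs⟩
          simp at hs
          exact absurd hs.1 ha
        · intro h
          simp [List.takeWhile] at h
      · have : (a :: w' ++ [' ']) <+: (b :: t' ++ [' ']) ↔ a = b ∧ (w' ++ [' ']) <+: (t' ++ [' ']) := by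
          simp [List.cons_prefix_cons]
        rw [this, ihw hw' t']
        simp [List.takeWhile, hb]

-- main lemma: an occurrence of " w " in "t " starts at a space of t, i.e. w is a later token
theorem pv_rest_iff (w : List Char) (hw : ' ' ∉ w) :
    ∀ t : List Char,
      ((' ' :: w ++ [' ']) <:+: (t ++ [' ']) ↔ w ∈ pvRestTok t) ∧
      ((' ' :: w ++ [' ']) <:+: (' ' :: t ++ [' ']) ↔ w ∈ pvToks t) := by
  intro t
  induction t with
  | nil =>
    constructor
    · constructor
      · intro h
        have := h.length_le
        simp at this
      · intro h; simp [pvRestTok] at h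
    · constructor
      · intro h
        have hl := h.length_le
        simp at hl
        have hwnil : w = [] := by
          cases w with
          | nil => rfl
          | cons a w' => simp at hl
        simp [pvToks, pvRestTok, List.takeWhile, hwnil]
      · intro h
        simp [pvToks, pvRestTok, List.takeWhile] at h
        subst h
        exact List.infix_rfl
  | cons c t' iht =>
    have step1 : (' ' :: w ++ [' ']) <:+: ((c :: t') ++ [' ']) ↔ w ∈ pvRestTok (c :: t') := by
      by_cases hc : c = ' '
      · subst hc
        show (' ' :: w ++ [' ']) <:+: (' ' :: t' ++ [' ']) ↔ _
        rw [iht.2]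
        simp [pvRestTok, pvToks]
      · rw [show ((c :: t') ++ [' ']) = c :: (t' ++ [' ']) by simp]
        rw [List.infix_cons_iff]
        have hnp : ¬ (' ' :: w ++ [' ']) <+: (c :: (t' ++ [' '])) := by
          intro hpre
          rcases hpre with ⟨s, hs⟩
          simp at hs
          exact hc hs.1.symm
        rw [show pvRestTok (c :: t') = pvRestTok t' by simp [pvRestTok, hc]]
        rw [← iht.1]
        simp only [hnp, false_or]
    refine ⟨step1, ?_⟩
    rw [show (' ' :: (c :: t') ++ [' ']) = ' ' :: ((c :: t') ++ [' ']) by simp]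
    rw [List.infix_cons_iff]
    have hpref : (' ' :: w ++ [' ']) <+: (' ' :: ((c :: t') ++ [' '])) ↔ w = (c :: t').takeWhile (· ≠ ' ') := by
      constructor
      · intro hpre
        have : (w ++ [' ']) <+: ((c :: t') ++ [' ']) := by
          rcases hpre with ⟨s, hs⟩
          simp at hs
          exact ⟨s, by simpa using hs⟩
        exact (pv_prefix_iff w hw (c :: t')).1 this
      · intro h
        have := (pv_prefix_iff w hw (c :: t')).2 h
        rcases this with ⟨s, hs⟩
        exact ⟨s, by simp [hs]⟩
    rw [step1, hpref]
    simp [pvToks]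

-- the per-word condition of A equals token membership of B's tokenization
theorem pv_word_iff (w tl : List Char) (hw : ' ' ∉ w) :
    PySem.Chars.isIn ([' '] ++ w ++ [' ']) ([' '] ++ tl ++ [' ']) = true
      ↔ w ∈ PySem.Chars.splitOn tl [' '] := by
  rw [PySem.Chars.isIn_iff_infix, pv_splitOn_eq]
  simpa using (pv_rest_iff w hw tl).2

theorem pv_aloop_iff (ws : List (List Char)) (tl : List Char) :
    pvALoop ws tl = true ↔ ∃ w ∈ ws, PySem.Chars.isIn ([' '] ++ w ++ [' ']) ([' '] ++ tl ++ [' ']) = true := by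
  induction ws with
  | nil => simp [pvALoop]
  | cons w ws ih =>
    show (if PySem.Chars.isIn ([' '] ++ w ++ [' ']) ([' '] ++ tl ++ [' ']) = true then true else pvALoop ws tl) = true ↔ _
    by_cases h : PySem.Chars.isIn ([' '] ++ w ++ [' ']) ([' '] ++ tl ++ [' ']) = true
    · rw [if_pos h]
      exact ⟨fun _ => ⟨w, by simp, h⟩, fun _ => rfl⟩
    · rw [if_neg h, ih]
      constructor
      · rintro ⟨u, hu, hin⟩
        exact ⟨u, by simp [hu], hin⟩
      · rintro ⟨u, hu, hin⟩
        rcases List.mem_cons.1 hu with rfl | hu'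
        · exact absurd hin h
        · exact ⟨u, hu', hin⟩

-- ===== VERDICT (by name: the statement is the Claim_ definition above) =====
theorem detect_contrastive_shift_py_spec : Claim_equal_detect_contrastive_shift_py := by
  intro text _
  unfold Spec_detect_contrastive_shift_py detect_contrastive_shift_py detect_contrastive_shift_py_alt
  set tl := PySem.Chars.lower text.toList with htl
  have hspace : ∀ w ∈ pvContrastWords, ' ' ∉ w := by decide
  rw [Bool.eq_iff_iff]
  rw [pv_aloop_iff]
  constructor
  · rintro ⟨w, hwmem, hwin⟩
    have := (pv_word_iff w tl (hspace w hwmem)).1 hwin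
    simp only [Bool.not_eq_true', ← Bool.not_eq_true]
    intro hemp
    rw [List.isEmpty_iff] at hemp
    have : w ∈ PySem.Set.inter (PySem.Set.ofList pvContrastWords) (PySem.Set.ofList (PySem.Chars.splitOn tl [' '])) := by
      rw [PySem.Set.mem_inter]
      exact ⟨(PySem.Set.mem_ofList ..).2 hwmem, (PySem.Set.mem_ofList ..).2 this⟩
    rw [hemp] at this
    simp at this
  · intro hne
    rw [Bool.not_eq_eq_eq_not, Bool.not_true, List.isEmpty_eq_false_iff_exists_mem] at hne
    rcases hne with ⟨w, hwmem⟩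
    rw [PySem.Set.mem_inter, PySem.Set.mem_ofList, PySem.Set.mem_ofList] at hwmem
    exact ⟨w, hwmem.1, (pv_word_iff w tl (hspace w hwmem.1)).2 hwmem.2⟩
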